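-- pv_equiv track=rewrite | github.com/eugeniopaglino/MigrationTracker | dem_utils.py | get_age_groups
-- ===== SOURCE A (Python) =====
-- def get_age_groups(age_min, age_max):
--
--     '''
--     This function generates a dictionary with age groups as keys. The keys are tuples whose first element
--     is the lower age limit and whose second element is the uppper age limit for each group. Each key has
--     a unique feature 'name' that contains a string with the following structure: lower_limit - upper_limit.
--
--     Each group contains five years and is constructed in such a way that the lower limit is a multiple of
--     five exception made for the first and the last group.
--     '''
--
--     age_groups = {}
--
--     for i in range(age_min, age_max+1):
--
--         if i == age_min:
--
--             lower_limit = i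
--
--             if i % 5 == 0:
--                 upper_limit = i + 4
--             else:
--                 for x in range(i,i+5):
--                     if x % 5 == 0:
--                         upper_limit = x-1
--
--             age_groups[(lower_limit, upper_limit)] = {'name':'{}-{}'.format(lower_limit, upper_limit)}
--
--         elif i == age_max:
--
--             for x in range(age_max-4,age_max+1):
--                 if x % 5 == 0:
--                     lower_limit = x
--
--             age_groups[(lower_limit, )] = {'name':'{}+'.format(lower_limit)}
--
--         else:
--
--             if i % 5 == 0:
--
--                 lower_limit = i
--                 upper_limit = lower_limit + 4
--                 age_groups[(lower_limit, upper_limit)] = {'name':'{}-{}'.format(lower_limit, upper_limit)}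
--
--     return age_groups
-- ===== SOURCE B (Python) =====
-- def get_age_groups(age_min, age_max):
--     """Step directly over 5-year group boundaries instead of scanning every age."""
--     if age_min > age_max:
--         return {}
--     groups = {}
--     hi = 5 * (age_min // 5) + 4
--     groups[(age_min, hi)] = {'name': '{}-{}'.format(age_min, hi)}
--     for m in range(hi + 1, age_max, 5):
--         groups[(m, m + 4)] = {'name': '{}-{}'.format(m, m + 4)}
--     if age_max != age_min:
--         lo = 5 * (age_max // 5)
--         groups[(lo,)] = {'name': '{}+'.format(lo)}
--     return groups
-- ===== Notes on version B (the rewrite author's own statement) =====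
-- stated objective: faster
-- what changed: B jumps directly from one 5-year group boundary to the next (a step-5 range between the computed first and last boundaries) instead of scanning every integer age and re-scanning 5-element windows to find boundaries.
import Mathlib
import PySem

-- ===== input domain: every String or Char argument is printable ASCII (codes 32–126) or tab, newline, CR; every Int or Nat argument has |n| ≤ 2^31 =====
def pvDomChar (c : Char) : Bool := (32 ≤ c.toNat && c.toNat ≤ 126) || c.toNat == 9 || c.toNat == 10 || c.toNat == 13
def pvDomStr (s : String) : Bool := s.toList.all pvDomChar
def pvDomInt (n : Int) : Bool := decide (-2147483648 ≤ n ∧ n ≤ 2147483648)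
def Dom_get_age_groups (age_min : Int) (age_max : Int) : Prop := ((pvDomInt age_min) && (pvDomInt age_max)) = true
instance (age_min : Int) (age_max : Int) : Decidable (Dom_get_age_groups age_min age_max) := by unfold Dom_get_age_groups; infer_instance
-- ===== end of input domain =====

-- B steps directly over the 5-year group boundaries instead of scanning every age (simpler decomposition, fewer iterations).

-- ===== PORT A =====
-- Python 'upper_limit'/'lower_limit' are assigned inside an inner scan over 5 consecutive
-- integers, which always contain a multiple of 5; the Option fold's '.getD 0' default is unreachable.
def get_age_groups (age_min : Int) (age_max : Int) : List (List Int × List (String × String)) :=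
  ((PySem.List.pyRange age_min (age_max + 1) 1).foldl (fun age_groups i =>
      if i == age_min then
        let lower_limit := i
        let upper_limit :=
          if PySem.Int.mod i 5 == 0 then i + 4
          else
            ((PySem.List.pyRange i (i + 5) 1).foldl
              (fun ul x => if PySem.Int.mod x 5 == 0 then some (x - 1) else ul) none).getD 0
        age_groups.insert [lower_limit, upper_limit]
          [("name", PySem.Int.toStr lower_limit ++ "-" ++ PySem.Int.toStr upper_limit)]
      else if i == age_max then
        let lower_limit :=
          ((PySem.List.pyRange (age_max - 4) (age_max + 1) 1).foldl
            (fun ll x => if PySem.Int.mod x 5 == 0 then some x else ll) none).getD 0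
        age_groups.insert [lower_limit] [("name", PySem.Int.toStr lower_limit ++ "+")]
      else
        if PySem.Int.mod i 5 == 0 then
          let lower_limit := i
          let upper_limit := lower_limit + 4
          age_groups.insert [lower_limit, upper_limit]
            [("name", PySem.Int.toStr lower_limit ++ "-" ++ PySem.Int.toStr upper_limit)]
        else age_groups)
    (PySem.Dict.empty : PySem.Dict (List Int) (List (String × String)))).items

-- ===== PORT B =====
def get_age_groups_alt (age_min : Int) (age_max : Int) : List (List Int × List (String × String)) :=
  if age_min > age_max then []
  else
    let hi := 5 * PySem.Int.floordiv age_min 5 + 4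
    let groups : PySem.Dict (List Int) (List (String × String)) :=
      PySem.Dict.empty.insert [age_min, hi]
        [("name", PySem.Int.toStr age_min ++ "-" ++ PySem.Int.toStr hi)]
    let groups := (PySem.List.pyRange (hi + 1) age_max 5).foldl
      (fun g m => g.insert [m, m + 4]
        [("name", PySem.Int.toStr m ++ "-" ++ PySem.Int.toStr (m + 4))]) groups
    let groups :=
      if age_max ≠ age_min then
        let lo := 5 * PySem.Int.floordiv age_max 5
        groups.insert [lo] [("name", PySem.Int.toStr lo ++ "+")]
      else groups
    groups.items

-- ===== PRECONDITION & SPEC =====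
def Spec_get_age_groups (age_min : Int) (age_max : Int) (out : List (List Int × List (String × String))) : Prop := out = get_age_groups_alt age_min age_max
instance (age_min : Int) (age_max : Int) (out : List (List Int × List (String × String))) : Decidable (Spec_get_age_groups age_min age_max out) := by unfold Spec_get_age_groups; infer_instance

-- ===== CLAIM (what is proved, stated in full; the proofs are below) =====
def Claim_equal_get_age_groups : Prop := ∀ (age_min : Int) (age_max : Int), Dom_get_age_groups age_min age_max → Spec_get_age_groups age_min age_max (get_age_groups age_min age_max)

-- ===== LEMMAS AND PROOFS =====

theorem pv_modbeq (z : Int) : (PySem.Int.mod z 5 == 0) = decide ((5:Int) ∣ z) := by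
  rw [Bool.eq_iff_iff]; simp only [beq_iff_eq, decide_eq_true_eq]; exact PySem.Int.mod_eq_zero_iff_dvd z 5


theorem pv_fdiv_bounds (a : Int) :
    5 * PySem.Int.floordiv a 5 ≤ a ∧ a < 5 * PySem.Int.floordiv a 5 + 5 := by
  have h := PySem.Int.floordiv_mul_add_mod a 5
  have h1 := PySem.Int.mod_nonneg a (b := 5) (by norm_num)
  have h2 := PySem.Int.mod_lt a (b := 5) (by norm_num)
  omega

theorem pv_fdiv_of_dvd (a : Int) (h : (5:Int) ∣ a) : 5 * PySem.Int.floordiv a 5 = a := by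
  have hb := pv_fdiv_bounds a
  omega

theorem pv_upperFold (i : Int) (h : ¬ (5:Int) ∣ i) :
    ((PySem.List.pyRange i (i + 5) 1).foldl
      (fun ul x => if PySem.Int.mod x 5 == 0 then some (x - 1) else ul) none)
    = some (5 * PySem.Int.floordiv i 5 + 4) := by
  have hqr := PySem.Int.floordiv_mul_add_mod i 5
  have h1 := PySem.Int.mod_nonneg i (b := 5) (by norm_num)
  have h2 := PySem.Int.mod_lt i (b := 5) (by norm_num)
  have hr : PySem.List.pyRange i (i + 5) 1 = [i, i+1, i+2, i+3, i+4] := by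
    rw [PySem.List.pyRange_one_cons (by omega), PySem.List.pyRange_one_cons (by omega),
        PySem.List.pyRange_one_cons (by omega), PySem.List.pyRange_one_cons (by omega),
        PySem.List.pyRange_one_cons (by omega), PySem.List.pyRange_one_eq_nil (by omega)]
    norm_num
    omega
  rw [hr]
  simp only [List.foldl, pv_modbeq]
  have hmod := PySem.Int.mod_eq_zero_iff_dvd i 5
  split_ifs with h1' h2' h3' h4' h5' <;>
    simp_all only [decide_eq_true_eq, Option.some.injEq] <;> omega

theorem pv_lowerFold (b : Int) :
    ((PySem.List.pyRange (b - 4) (b + 1) 1).foldl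
      (fun ll x => if PySem.Int.mod x 5 == 0 then some x else ll) none)
    = some (5 * PySem.Int.floordiv b 5) := by
  have hqr := PySem.Int.floordiv_mul_add_mod b 5
  have h1 := PySem.Int.mod_nonneg b (b := 5) (by norm_num)
  have h2 := PySem.Int.mod_lt b (b := 5) (by norm_num)
  have hr : PySem.List.pyRange (b - 4) (b + 1) 1 = [b-4, b-3, b-2, b-1, b] := by
    rw [PySem.List.pyRange_one_cons (by omega), PySem.List.pyRange_one_cons (by omega),
        PySem.List.pyRange_one_cons (by omega), PySem.List.pyRange_one_cons (by omega),
        PySem.List.pyRange_one_cons (by omega), PySem.List.pyRange_one_eq_nil (by omega)]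
    norm_num
    omega
  rw [hr]
  simp only [List.foldl, pv_modbeq]
  have hmod := PySem.Int.mod_eq_zero_iff_dvd b 5
  split_ifs with h1' h2' h3' h4' h5' <;>
    simp_all only [decide_eq_true_eq, Option.some.injEq] <;> omega

theorem pv_pyRange5_cons {a b : Int} (h : a < b) :
    PySem.List.pyRange a b 5 = a :: PySem.List.pyRange (a + 5) b 5 := by
  rw [PySem.List.pyRange_of_pos a b (by norm_num), PySem.List.pyRange_of_pos (a+5) b (by norm_num)]
  simp only [if_pos h]
  have hn : ((b - a + 5 - 1) / 5).toNat = (if a + 5 < b then ((b - (a+5) + 5 - 1) / 5).toNat else 0) + 1 := by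
    split_ifs <;> omega
  rw [hn, List.range_succ_eq_map]
  simp only [List.map_cons, List.map_map]
  congr 1
  · omega
  · apply List.map_congr_left
    intro k _
    simp only [Function.comp_apply, Nat.succ_eq_add_one]
    push_cast
    ring

theorem pv_pyRange5_nil {a b : Int} (h : b ≤ a) : PySem.List.pyRange a b 5 = [] := by
  rw [PySem.List.pyRange_of_pos a b (by norm_num)]
  simp [show ¬ a < b by omega]

theorem pv_filter5 (hi : Int) : ∀ (n : Nat) (lo m0 : Int), (hi - lo).toNat ≤ n →
    (5:Int) ∣ m0 → lo ≤ m0 → m0 < lo + 5 →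
    (PySem.List.pyRange lo hi 1).filter (fun i => PySem.Int.mod i 5 == 0)
      = PySem.List.pyRange m0 hi 5 := by
  intro n
  induction n with
  | zero =>
    intro lo m0 hn h5 hl hu
    rw [PySem.List.pyRange_one_eq_nil (by omega), pv_pyRange5_nil (by omega)]
    simp
  | succ n ih =>
    intro lo m0 hn h5 hl hu
    by_cases hlt : lo < hi
    · rw [PySem.List.pyRange_one_cons hlt, List.filter_cons]
      by_cases hdvd : (5:Int) ∣ lo
      · have hm0 : m0 = lo := by omega
        rw [pv_modbeq, if_pos (by simp [hdvd]), hm0, pv_pyRange5_cons hlt]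
        congr 1
        exact ih (lo+1) (lo+5) (by omega) (by omega) (by omega) (by omega)
      · rw [pv_modbeq, if_neg (by simp [hdvd])]
        have hne : m0 ≠ lo := by rintro rfl; exact hdvd h5
        exact ih (lo+1) m0 (by omega) h5 (by omega) (by omega)
    · rw [PySem.List.pyRange_one_eq_nil (by omega), pv_pyRange5_nil (by omega)]
      simp

def pvItem (m : Int) : List Int × List (String × String) :=
  ([m, m + 4], [("name", PySem.Int.toStr m ++ "-" ++ PySem.Int.toStr (m + 4))])
def pvLast (b : Int) : List Int × List (String × String) :=
  ([5 * PySem.Int.floordiv b 5], [("name", PySem.Int.toStr (5 * PySem.Int.floordiv b 5) ++ "+")])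

theorem pv_containsFalse (d : PySem.Dict (List Int) (List (String × String))) (k : List Int)
    (h : ∀ p ∈ d.items, p.1 ≠ k) : d.contains k = false := by
  rw [PySem.Dict.contains_eq_decide_mem_keys]
  simp only [PySem.Dict.keys, List.mem_map, decide_eq_false_iff_not]
  rintro ⟨p, hp, hpk⟩
  exact h p hp hpk

theorem pv_restA (amin amax : Int) : ∀ (n : Nat) (lo : Int)
    (d : PySem.Dict (List Int) (List (String × String))), (amax + 1 - lo).toNat ≤ n →
    amin < lo →
    (∀ p ∈ d.items, ∃ a b, p.1 = [a, b] ∧ a < lo) →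
    ((PySem.List.pyRange lo (amax + 1) 1).foldl (fun age_groups i =>
      if i == amin then
        let lower_limit := i
        let upper_limit :=
          if PySem.Int.mod i 5 == 0 then i + 4
          else
            ((PySem.List.pyRange i (i + 5) 1).foldl
              (fun ul x => if PySem.Int.mod x 5 == 0 then some (x - 1) else ul) none).getD 0
        age_groups.insert [lower_limit, upper_limit]
          [("name", PySem.Int.toStr lower_limit ++ "-" ++ PySem.Int.toStr upper_limit)]
      else if i == amax then
        let lower_limit :=
          ((PySem.List.pyRange (amax - 4) (amax + 1) 1).foldl
            (fun ll x => if PySem.Int.mod x 5 == 0 then some x else ll) none).getD 0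
        age_groups.insert [lower_limit] [("name", PySem.Int.toStr lower_limit ++ "+")]
      else
        if PySem.Int.mod i 5 == 0 then
          let lower_limit := i
          let upper_limit := lower_limit + 4
          age_groups.insert [lower_limit, upper_limit]
            [("name", PySem.Int.toStr lower_limit ++ "-" ++ PySem.Int.toStr upper_limit)]
        else age_groups) d).items
    = d.items
      ++ ((PySem.List.pyRange lo amax 1).filter (fun i => PySem.Int.mod i 5 == 0)).map pvItem
      ++ (if lo ≤ amax then [pvLast amax] else []) := by
  intro n
  induction n with
  | zero =>
    intro lo d hn hlo hinv
    rw [PySem.List.pyRange_one_eq_nil (a := lo) (b := amax + 1) (by omega),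
        PySem.List.pyRange_one_eq_nil (a := lo) (b := amax) (by omega),
        if_neg (by omega)]
    simp
  | succ n ih =>
    intro lo d hn hlo hinv
    by_cases hle : lo ≤ amax
    · rw [PySem.List.pyRange_one_cons (a := lo) (b := amax + 1) (by omega), List.foldl_cons]
      have hA : (lo == amin) = false := by simp only [beq_eq_false_iff_ne, ne_eq]; omega
      by_cases heq : lo = amax
      · -- last iteration: the 1-tuple group is inserted, remaining range is empty
        have hB : (lo == amax) = true := by simp [heq]
        rw [PySem.List.pyRange_one_eq_nil (a := lo + 1) (b := amax + 1) (by omega),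
            PySem.List.pyRange_one_eq_nil (a := lo) (b := amax) (by omega)]
        simp only [List.foldl_nil, hA, hB, Bool.false_eq_true, if_false, if_true,
          pv_lowerFold, Option.getD_some, List.filter_nil, List.map_nil]
        have hcont : d.contains [5 * PySem.Int.floordiv amax 5] = false := by
          apply pv_containsFalse
          intro p hp
          obtain ⟨a, b, hk, _⟩ := hinv p hp
          simp [hk]
        rw [PySem.Dict.items_insert_of_not_contains _ _ hcont, if_pos (by omega)]
        simp [pvLast]
      · -- interior iteration
        have hB : (lo == amax) = false := by simp only [beq_eq_false_iff_ne, ne_eq]; omega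
        have hlt : lo < amax := by omega
        rw [PySem.List.pyRange_one_cons (a := lo) (b := amax) (by omega), List.filter_cons]
        by_cases hdvd : (5:Int) ∣ lo
        · have hC : (PySem.Int.mod lo 5 == 0) = true := by
            rw [pv_modbeq]; simp [hdvd]
          simp only [hA, hB, hC, Bool.false_eq_true, if_false, if_true]
          have hcont : d.contains [lo, lo + 4] = false := by
            apply pv_containsFalse
            intro p hp
            obtain ⟨a, b, hk, ha⟩ := hinv p hp
            simp [hk]; omega
          have hrec := ih (lo + 1) (d.insert [lo, lo + 4]
              [("name", PySem.Int.toStr lo ++ "-" ++ PySem.Int.toStr (lo + 4))])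
            (by omega) (by omega) ?_
          · rw [hrec, PySem.Dict.items_insert_of_not_contains _ _ hcont]
            simp only [pvItem, List.map_cons, List.append_assoc, List.cons_append,
              List.nil_append]
            rw [if_pos (show lo + 1 ≤ amax by omega), if_pos hle]
          · intro p hp
            rw [PySem.Dict.items_insert_of_not_contains _ _ hcont] at hp
            rcases List.mem_append.1 hp with hp | hp
            · obtain ⟨a, b, hk, ha⟩ := hinv p hp
              exact ⟨a, b, hk, by omega⟩
            · simp at hp
              exact ⟨lo, lo + 4, by simp [hp], by omega⟩
        · have hC : (PySem.Int.mod lo 5 == 0) = false := by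
            rw [pv_modbeq]; simp [hdvd]
          simp only [hA, hB, hC, Bool.false_eq_true, if_false]
          have hrec := ih (lo + 1) d (by omega) (by omega)
            (by intro p hp; obtain ⟨a, b, hk, ha⟩ := hinv p hp; exact ⟨a, b, hk, by omega⟩)
          rw [hrec, if_pos (show lo + 1 ≤ amax by omega), if_pos hle]
    · rw [PySem.List.pyRange_one_eq_nil (a := lo) (b := amax + 1) (by omega),
          PySem.List.pyRange_one_eq_nil (a := lo) (b := amax) (by omega),
          if_neg (by omega)]
      simp

theorem pv_A_eq_B (amin amax : Int) : get_age_groups amin amax = get_age_groups_alt amin amax := by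
  by_cases hord : amax < amin
  · simp only [get_age_groups, get_age_groups_alt, if_pos (show amin > amax from hord)]
    rw [PySem.List.pyRange_one_eq_nil (a := amin) (b := amax + 1) (by omega)]
    simp [PySem.Dict.empty]
  · have hle : amin ≤ amax := by omega
    have hbq := pv_fdiv_bounds amin
    have hU : (if PySem.Int.mod amin 5 == 0 then amin + 4
        else ((PySem.List.pyRange amin (amin + 5) 1).foldl
          (fun ul x => if PySem.Int.mod x 5 == 0 then some (x - 1) else ul) none).getD 0)
        = 5 * PySem.Int.floordiv amin 5 + 4 := by
      by_cases hdvd : (5:Int) ∣ amin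
      · rw [if_pos (by rw [pv_modbeq]; simp [hdvd]), pv_fdiv_of_dvd amin hdvd]
      · rw [if_neg (by rw [pv_modbeq]; simp [hdvd]), pv_upperFold amin hdvd]
        simp
    -- A side
    rw [show get_age_groups amin amax =
      ((PySem.List.pyRange amin (amax + 1) 1).foldl (fun age_groups i =>
        if i == amin then
          let lower_limit := i
          let upper_limit :=
            if PySem.Int.mod i 5 == 0 then i + 4
            else
              ((PySem.List.pyRange i (i + 5) 1).foldl
                (fun ul x => if PySem.Int.mod x 5 == 0 then some (x - 1) else ul) none).getD 0
          age_groups.insert [lower_limit, upper_limit]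
            [("name", PySem.Int.toStr lower_limit ++ "-" ++ PySem.Int.toStr upper_limit)]
        else if i == amax then
          let lower_limit :=
            ((PySem.List.pyRange (amax - 4) (amax + 1) 1).foldl
              (fun ll x => if PySem.Int.mod x 5 == 0 then some x else ll) none).getD 0
          age_groups.insert [lower_limit] [("name", PySem.Int.toStr lower_limit ++ "+")]
        else
          if PySem.Int.mod i 5 == 0 then
            let lower_limit := i
            let upper_limit := lower_limit + 4
            age_groups.insert [lower_limit, upper_limit]
              [("name", PySem.Int.toStr lower_limit ++ "-" ++ PySem.Int.toStr upper_limit)]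
          else age_groups)
      (PySem.Dict.empty : PySem.Dict (List Int) (List (String × String)))).items from rfl]
    rw [PySem.List.pyRange_one_cons (a := amin) (b := amax + 1) (by omega), List.foldl_cons]
    simp only [BEq.rfl, if_true, hU]
    have hitems : ((PySem.Dict.empty : PySem.Dict (List Int) (List (String × String))).insert
        [amin, 5 * PySem.Int.floordiv amin 5 + 4]
        [("name", PySem.Int.toStr amin ++ "-" ++ PySem.Int.toStr (5 * PySem.Int.floordiv amin 5 + 4))]).items
        = [([amin, 5 * PySem.Int.floordiv amin 5 + 4],
            [("name", PySem.Int.toStr amin ++ "-" ++ PySem.Int.toStr (5 * PySem.Int.floordiv amin 5 + 4))])] := by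
      rw [PySem.Dict.items_insert_of_not_contains _ _ (by simp)]
      simp [PySem.Dict.empty]
    rw [pv_restA amin amax (amax + 1 - (amin + 1)).toNat (amin + 1) _ le_rfl (by omega)
      (by intro p hp; rw [hitems] at hp; simp at hp
          exact ⟨amin, 5 * PySem.Int.floordiv amin 5 + 4, by simp [hp], by omega⟩)]
    rw [pv_filter5 amax (amax - (amin + 1)).toNat (amin + 1)
      (5 * PySem.Int.floordiv amin 5 + 4 + 1) le_rfl (by omega) (by omega) (by omega)]
    rw [hitems]
    -- B side
    simp only [get_age_groups_alt, if_neg (show ¬ amin > amax by omega)]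
    have hnodup : ((PySem.List.pyRange (5 * PySem.Int.floordiv amin 5 + 4 + 1) amax 5).map
        (fun m => [m, m + 4])).Nodup := by
      rw [PySem.List.pyRange_of_pos _ _ (by norm_num), List.map_map]
      refine List.Nodup.map ?_ (List.nodup_range)
      intro a b hab
      simp only [Function.comp_apply, List.cons.injEq, and_true] at hab
      omega
    have hfresh : ∀ m ∈ PySem.List.pyRange (5 * PySem.Int.floordiv amin 5 + 4 + 1) amax 5,
        ((PySem.Dict.empty : PySem.Dict (List Int) (List (String × String))).insert
          [amin, 5 * PySem.Int.floordiv amin 5 + 4]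
          [("name", PySem.Int.toStr amin ++ "-" ++ PySem.Int.toStr (5 * PySem.Int.floordiv amin 5 + 4))]).contains
          [m, m + 4] = false := by
      intro m hm
      have := (PySem.List.mem_pyRange_iff_of_pos (by norm_num) m).1 hm
      apply pv_containsFalse
      intro p hp
      rw [hitems] at hp
      simp at hp
      simp [hp]
      omega
    have hfold := PySem.Dict.items_foldl_insert_fresh
      (PySem.List.pyRange (5 * PySem.Int.floordiv amin 5 + 4 + 1) amax 5)
      (fun m => [m, m + 4])
      (fun m => [("name", PySem.Int.toStr m ++ "-" ++ PySem.Int.toStr (m + 4))])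
      _ hfresh hnodup
    simp only [] at hfold
    by_cases hcase : amin = amax
    · rw [if_neg (show ¬(amax ≠ amin) by omega), hfold, hitems,
        pv_pyRange5_nil (show amax ≤ 5 * PySem.Int.floordiv amin 5 + 4 + 1 by omega),
        if_neg (show ¬(amin + 1 ≤ amax) by omega)]
      simp
    · rw [if_pos (show amax ≠ amin by omega)]
      have hcont2 : ((PySem.List.pyRange (5 * PySem.Int.floordiv amin 5 + 4 + 1) amax 5).foldl
          (fun g m => g.insert [m, m + 4]
            [("name", PySem.Int.toStr m ++ "-" ++ PySem.Int.toStr (m + 4))])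
          ((PySem.Dict.empty : PySem.Dict (List Int) (List (String × String))).insert
            [amin, 5 * PySem.Int.floordiv amin 5 + 4]
            [("name", PySem.Int.toStr amin ++ "-" ++ PySem.Int.toStr (5 * PySem.Int.floordiv amin 5 + 4))])).contains
          [5 * PySem.Int.floordiv amax 5] = false := by
        apply pv_containsFalse
        intro p hp
        rw [hfold, hitems] at hp
        rcases List.mem_append.1 hp with hp | hp
        · simp at hp; simp [hp]
        · simp only [List.mem_map] at hp
          obtain ⟨m, _, hm⟩ := hp
          rw [← hm]
          simp
      rw [PySem.Dict.items_insert_of_not_contains _ _ hcont2, hfold, hitems,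
        if_pos (show amin + 1 ≤ amax by omega)]
      simp [pvItem, pvLast]

-- ===== VERDICT (by name: the statement is the Claim_ definition above) =====
theorem get_age_groups_spec : Claim_equal_get_age_groups := by
  intro amin amax _
  unfold Spec_get_age_groups
  exact pv_A_eq_B amin amax
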